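-- pv_equiv track=rewrite | github.com/sam121/sg-kids-culture | scripts/build_site.py | _summarize_age_ranges
-- ===== SOURCE A (Python) =====
-- from typing import Any, Dict, List, Optional, Tuple
--
-- def _summarize_age_ranges(ranges: List[Tuple[Optional[int], Optional[int]]]) -> Tuple[Optional[int], Optional[int]]:
--     if not ranges:
--         return None, None
--     lows = [lo for lo, _ in ranges if lo is not None]
--     highs = [hi for _, hi in ranges if hi is not None]
--     lo = min(lows) if lows else None
--     hi = None if any(hi is None for _, hi in ranges) else (max(highs) if highs else None)
--     if lo is not None and hi is not None and lo > hi: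
--         lo, hi = hi, lo
--     return lo, hi
-- ===== SOURCE B (Python) =====
-- from typing import List, Optional, Tuple
--
-- def _summarize_age_ranges(ranges):
--     if not ranges:
--         return None, None
--     lo, hi = _merge_summaries(ranges)
--     if lo is not None and hi is not None and lo > hi:
--         lo, hi = hi, lo
--     return lo, hi
--
-- def _merge_summaries(ranges):
--     # Divide and conquer: the summary of a nonempty list is the merge of the
--     # summaries of its two halves.  A None low is an identity (no known lower
--     # bound yet), a None high is absorbing (an unbounded upper bound).
--     if len(ranges) == 1:
--         return ranges[0]
--     mid = len(ranges) // 2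
--     ll, lh = _merge_summaries(ranges[:mid])
--     rl, rh = _merge_summaries(ranges[mid:])
--     lo = rl if ll is None else (ll if rl is None else min(ll, rl))
--     hi = None if (lh is None or rh is None) else max(lh, rh)
--     return lo, hi
-- ===== Notes on version B (the rewrite author's own statement) =====
-- stated objective: alternative
-- what changed: Replaces A's four whole-list passes (two comprehensions, an any() scan, min/max) with a divide-and-conquer recursion that merges half-summaries, treating a None high as an absorbing 'unbounded' element instead of scanning for it separately.
import Mathlib
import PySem

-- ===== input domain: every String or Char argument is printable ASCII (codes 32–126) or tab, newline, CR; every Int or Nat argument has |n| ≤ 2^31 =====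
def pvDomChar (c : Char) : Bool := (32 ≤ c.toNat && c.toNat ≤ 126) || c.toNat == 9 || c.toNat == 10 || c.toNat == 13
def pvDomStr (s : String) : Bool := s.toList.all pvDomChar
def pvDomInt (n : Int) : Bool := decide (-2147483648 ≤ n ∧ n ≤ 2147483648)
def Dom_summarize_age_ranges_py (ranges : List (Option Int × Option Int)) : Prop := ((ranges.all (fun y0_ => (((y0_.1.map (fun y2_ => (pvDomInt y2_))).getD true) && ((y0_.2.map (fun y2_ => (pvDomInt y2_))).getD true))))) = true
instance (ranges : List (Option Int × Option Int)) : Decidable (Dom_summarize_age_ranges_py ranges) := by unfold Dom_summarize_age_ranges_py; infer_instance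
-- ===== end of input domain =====

-- B replaces A's four whole-list passes with a divide-and-conquer recursion merging
-- half-summaries (None high absorbing, None low an identity); same result, different algorithm.


-- ===== PORT A =====
def summarize_age_ranges_py (ranges : List (Option Int × Option Int)) : Option Int × Option Int :=
  if ranges = [] then (none, none) else
  let lows := ranges.filterMap (fun p => p.1)
  let highs := ranges.filterMap (fun p => p.2)
  let lo := if lows ≠ [] then PySem.List.min? lows (fun x => x) else none
  let hi := if ranges.any (fun p => p.2 == none) then none
            else if highs ≠ [] then PySem.List.max? highs (fun x => x) else none
  match lo, hi with
  | some a, some b => if a > b then (some b, some a) else (some a, some b)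
  | _, _ => (lo, hi)

-- ===== PORT B =====
-- `ranges[:mid]` / `ranges[mid:]` with 0 ≤ mid ≤ len are exactly List.take / List.drop.
def pvMergeSummaries : List (Option Int × Option Int) → Option Int × Option Int
  | [] => (none, none)   -- unreachable: Source B's helper is only called on nonempty lists
  | [p] => p
  | p :: q :: rest =>
      let l := p :: q :: rest
      let mid := l.length / 2
      let a := pvMergeSummaries (l.take mid)
      let b := pvMergeSummaries (l.drop mid)
      let lo := match a.1 with
        | none => b.1
        | some v => match b.1 with | none => some v | some w => some (min v w)
      let hi := match a.2 with
        | none => none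
        | some v => match b.2 with | none => none | some w => some (max v w)
      (lo, hi)
termination_by l => l.length
decreasing_by
  · simp [List.length_take]; omega
  · simp [List.length_drop]; omega

def summarize_age_ranges_py_alt (ranges : List (Option Int × Option Int)) : Option Int × Option Int :=
  if ranges = [] then (none, none) else
  let s := pvMergeSummaries ranges
  let lo := s.1
  let hi := s.2
  -- `if lo is not None and hi is not None and lo > hi: lo, hi = hi, lo`
  let doswap : Bool := (lo.bind (fun a => hi.map (fun b => decide (a > b)))).getD false
  if doswap then (hi, lo) else (lo, hi)

-- ===== PRECONDITION & SPEC =====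
def Spec_summarize_age_ranges_py (ranges : List (Option Int × Option Int)) (out : Option Int × Option Int) : Prop := out = summarize_age_ranges_py_alt ranges
instance (ranges : List (Option Int × Option Int)) (out : Option Int × Option Int) : Decidable (Spec_summarize_age_ranges_py ranges out) := by unfold Spec_summarize_age_ranges_py; infer_instance

-- ===== CLAIM =====
def Claim_equal_summarize_age_ranges_py : Prop := ∀ (ranges : List (Option Int × Option Int)), Dom_summarize_age_ranges_py ranges → Spec_summarize_age_ranges_py ranges (summarize_age_ranges_py ranges)

-- ===== LEMMAS AND PROOFS =====

-- the value pvMergeSummaries computes, stated as A-style whole-list scans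
def pvLoSpec (l : List (Option Int × Option Int)) : Option Int :=
  PySem.List.min? (l.filterMap (fun p => p.1)) (fun x => x)

def pvHiSpec (l : List (Option Int × Option Int)) : Option Int :=
  if l.any (fun p => p.2 == none) then none
  else PySem.List.max? (l.filterMap (fun p => p.2)) (fun x => x)

theorem pv_foldl_min_pull (t : List Int) : ∀ v w : Int,
    t.foldl min (min v w) = min v (t.foldl min w) := by
  induction t with
  | nil => intro v w; rfl
  | cons z t ih =>
    intro v w
    simp only [List.foldl, min_assoc]
    exact ih v (min w z)

theorem pv_foldl_max_pull (t : List Int) : ∀ v w : Int,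
    t.foldl max (max v w) = max v (t.foldl max w) := by
  induction t with
  | nil => intro v w; rfl
  | cons z t ih =>
    intro v w
    simp only [List.foldl, max_assoc]
    exact ih v (max w z)

theorem pv_min?_append (A B : List Int) :
    PySem.List.min? (A ++ B) (fun x => x) =
      match PySem.List.min? A (fun x => x), PySem.List.min? B (fun x => x) with
      | none, b => b
      | some v, none => some v
      | some v, some w => some (min v w) := by
  cases A with
  | nil => cases B <;> simp only [List.nil_append, PySem.List.min?_id_cons] <;> rfl
  | cons a la =>
    cases B with
    | nil => simp only [List.append_nil, PySem.List.min?_id_cons]; rfl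
    | cons b lb =>
      simp only [List.cons_append, PySem.List.min?_id_cons]
      rw [List.foldl_append]
      simp only [List.foldl]
      rw [pv_foldl_min_pull]

theorem pv_max?_append (A B : List Int) :
    PySem.List.max? (A ++ B) (fun x => x) =
      match PySem.List.max? A (fun x => x), PySem.List.max? B (fun x => x) with
      | some v, some w => some (max v w)
      | none, b => b
      | some v, none => some v := by
  cases A with
  | nil => cases B <;> simp only [List.nil_append, PySem.List.max?_id_cons] <;> rfl
  | cons a la =>
    cases B with
    | nil => simp only [List.append_nil, PySem.List.max?_id_cons]; rfl
    | cons b lb =>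
      simp only [List.cons_append, PySem.List.max?_id_cons]
      rw [List.foldl_append]
      simp only [List.foldl]
      rw [pv_foldl_max_pull]

theorem pv_filterMap_snd_ne_nil (A : List (Option Int × Option Int)) (hA : A ≠ [])
    (hno : A.any (fun p => p.2 == none) = false) :
    A.filterMap (fun p => p.2) ≠ [] := by
  cases A with
  | nil => exact absurd rfl hA
  | cons p t =>
    rcases p with ⟨l0, h0⟩
    cases h0 with
    | none => simp at hno
    | some v => simp

theorem pvLoSpec_append (A B : List (Option Int × Option Int)) :
    pvLoSpec (A ++ B) =
      match pvLoSpec A, pvLoSpec B with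
      | none, b => b
      | some v, none => some v
      | some v, some w => some (min v w) := by
  unfold pvLoSpec
  rw [List.filterMap_append, pv_min?_append]

theorem pvHiSpec_append (A B : List (Option Int × Option Int)) (hA : A ≠ []) (hB : B ≠ []) :
    pvHiSpec (A ++ B) =
      match pvHiSpec A, pvHiSpec B with
      | some v, some w => some (max v w)
      | _, _ => none := by
  unfold pvHiSpec
  rw [List.any_append]
  cases ha : A.any (fun p => p.2 == none) with
  | true => simp
  | false =>
    cases hb : B.any (fun p => p.2 == none) with
    | true =>
      simp only [Bool.false_or, if_true]
      rcases hm : PySem.List.max? (A.filterMap (fun p => p.2)) (fun x => x) with _ | v <;> simp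
    | false =>
      simp only [Bool.false_or]
      rw [List.filterMap_append, pv_max?_append]
      rcases hfa : A.filterMap (fun p => p.2) with _ | ⟨a, la⟩
      · exact absurd hfa (pv_filterMap_snd_ne_nil A hA ha)
      · rcases hfb : B.filterMap (fun p => p.2) with _ | ⟨b, lb⟩
        · exact absurd hfb (pv_filterMap_snd_ne_nil B hB hb)
        · rw [hfa, hfb]
          simp [PySem.List.max?_id_cons]

theorem pvMerge_eq : ∀ (l : List (Option Int × Option Int)), l ≠ [] →
    pvMergeSummaries l = (pvLoSpec l, pvHiSpec l) := by
  intro l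
  induction l using pvMergeSummaries.induct with
  | case1 => intro h; exact absurd rfl h
  | case2 p =>
    intro _
    rcases p with ⟨l0, h0⟩
    cases l0 <;> cases h0 <;>
      simp [pvMergeSummaries, pvLoSpec, pvHiSpec, PySem.List.min?, PySem.List.max?]
  | case3 p q rest _l _mid ih1 ih2 =>
    intro _
    have hlen : (p :: q :: rest).length ≥ 2 := by simp
    have hmid1 : 1 ≤ (p :: q :: rest).length / 2 := by omega
    have hmid2 : (p :: q :: rest).length / 2 < (p :: q :: rest).length := by omega
    have htake : (p :: q :: rest).take ((p :: q :: rest).length / 2) ≠ [] := by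
      intro hc
      have := congrArg List.length hc
      simp [List.length_take] at this
    have hdrop : (p :: q :: rest).drop ((p :: q :: rest).length / 2) ≠ [] := by
      intro hc
      have := congrArg List.length hc
      simp [List.length_drop] at this
      omega
    have hsplit : (p :: q :: rest).take ((p :: q :: rest).length / 2) ++
        (p :: q :: rest).drop ((p :: q :: rest).length / 2) = p :: q :: rest :=
      List.take_append_drop _ _
    rw [pvMergeSummaries]
    rw [ih1 htake, ih2 hdrop]
    have hl : pvLoSpec (p :: q :: rest) =
        match pvLoSpec ((p :: q :: rest).take ((p :: q :: rest).length / 2)),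
              pvLoSpec ((p :: q :: rest).drop ((p :: q :: rest).length / 2)) with
        | none, b => b
        | some v, none => some v
        | some v, some w => some (min v w) := by
      conv_lhs => rw [← hsplit]
      rw [pvLoSpec_append]
    have hh : pvHiSpec (p :: q :: rest) =
        match pvHiSpec ((p :: q :: rest).take ((p :: q :: rest).length / 2)),
              pvHiSpec ((p :: q :: rest).drop ((p :: q :: rest).length / 2)) with
        | some v, some w => some (max v w)
        | _, _ => none := by
      conv_lhs => rw [← hsplit]
      rw [pvHiSpec_append _ _ htake hdrop]
    have e1 : List.take ((p :: q :: rest).length / 2) (p :: q :: rest) = List.take _mid _l := rfl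
    have e2 : List.drop ((p :: q :: rest).length / 2) (p :: q :: rest) = List.drop _mid _l := rfl
    rw [hl, hh, e1, e2]
    rcases pvLoSpec (List.take _mid _l) with _ | a1 <;>
      rcases pvLoSpec (List.drop _mid _l) with _ | a2 <;>
      rcases pvHiSpec (List.take _mid _l) with _ | b1 <;>
      rcases pvHiSpec (List.drop _mid _l) with _ | b2 <;> rfl

-- ===== VERDICT =====
theorem summarize_age_ranges_py_spec : Claim_equal_summarize_age_ranges_py := by
  intro ranges _
  unfold Spec_summarize_age_ranges_py summarize_age_ranges_py summarize_age_ranges_py_alt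
  by_cases h : ranges = []
  · simp [h]
  · simp only [h, if_false]
    rw [pvMerge_eq ranges h]
    have hlo : (if ranges.filterMap (fun p => p.1) ≠ [] then
        PySem.List.min? (ranges.filterMap (fun p => p.1)) (fun x => x) else none) =
        pvLoSpec ranges := by
      unfold pvLoSpec
      by_cases hne : ranges.filterMap (fun p => p.1) = []
      · simp [hne, PySem.List.min?]
      · simp [hne]
    have hhi : (if ranges.any (fun p => p.2 == none) then none
        else if ranges.filterMap (fun p => p.2) ≠ [] then
          PySem.List.max? (ranges.filterMap (fun p => p.2)) (fun x => x) else none) =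
        pvHiSpec ranges := by
      unfold pvHiSpec
      by_cases hne : ranges.filterMap (fun p => p.2) = []
      · cases ranges.any (fun p => p.2 == none) <;> simp [hne, PySem.List.max?]
      · cases ranges.any (fun p => p.2 == none) <;> simp [hne]
    rw [hlo, hhi]
    rcases pvLoSpec ranges with _ | a <;> rcases pvHiSpec ranges with _ | b <;>
      simp [Option.bind]
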